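-- pv_equiv track=rewrite | github.com/kidj2020/test_case_id_star | case_03/case_03.py | get_risk_segment
-- ===== SOURCE A (Python) =====
-- def get_risk_segment(total_score):
--     segment = {
--         379 : "Very Low Risk (VLR)",
--         375 : "Low Risk (LR)",
--         370 : "Medium Risk (MR)",
--         350 : "High Risk (HR)",
--         325 : "Very High Risk (VHR)",
--         0 : "Very High Risk (VHR) 2",
--     }
--
--     for key, letter in segment.items():
--         if total_score > key:
--             return letter
--     return "NaN"
-- ===== SOURCE B (Python) =====
-- import bisect
--
-- _BREAKPOINTS = [0, 325, 350, 370, 375, 379]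
-- _LABELS = [
--     "Very High Risk (VHR) 2",
--     "Very High Risk (VHR)",
--     "High Risk (HR)",
--     "Medium Risk (MR)",
--     "Low Risk (LR)",
--     "Very Low Risk (VLR)",
-- ]
--
-- def get_risk_segment(total_score):
--     idx = bisect.bisect_left(_BREAKPOINTS, total_score)
--     if idx == 0:
--         return "NaN"
--     return _LABELS[idx - 1]
-- ===== Notes on version B (the rewrite author's own statement) =====
-- stated objective: idiomatic
-- what changed: Replaced A's linear scan over a descending-threshold dict with bisect.bisect_left binary search over ascending breakpoints plus a parallel label table.
import Mathlib
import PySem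

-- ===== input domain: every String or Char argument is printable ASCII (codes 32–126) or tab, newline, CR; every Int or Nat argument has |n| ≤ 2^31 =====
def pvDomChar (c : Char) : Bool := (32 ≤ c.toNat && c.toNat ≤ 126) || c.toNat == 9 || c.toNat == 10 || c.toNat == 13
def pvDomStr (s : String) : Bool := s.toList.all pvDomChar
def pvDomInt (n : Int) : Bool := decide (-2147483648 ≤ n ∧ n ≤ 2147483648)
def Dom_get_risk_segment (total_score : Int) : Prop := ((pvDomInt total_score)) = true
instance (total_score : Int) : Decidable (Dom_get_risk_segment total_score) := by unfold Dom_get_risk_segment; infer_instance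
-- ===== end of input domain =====

-- B replaces A's linear scan over a descending threshold dict by a bisect_left
-- binary search over ascending breakpoints with a parallel label table (idiomatic).

-- ===== PORT A =====
-- A iterates the dict's items in insertion order, returning the first label whose key the score exceeds.
def getRiskLoopA (total_score : Int) : List (Int × String) → String
  | [] => "NaN"
  | (key, letter) :: rest =>
    if total_score > key then letter else getRiskLoopA total_score rest

def get_risk_segment (total_score : Int) : String :=
  let segment : PySem.Dict Int String :=
    (((((PySem.Dict.empty.insert 379 "Very Low Risk (VLR)").insert 375 "Low Risk (LR)").insert
        370 "Medium Risk (MR)").insert 350 "High Risk (HR)").insert 325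
        "Very High Risk (VHR)").insert 0 "Very High Risk (VHR) 2"
  getRiskLoopA total_score segment.items

-- ===== PORT B =====
-- bisect.bisect_left on a list of Ints, transcribed as a lo/hi binary search.
def bisectLeftB (a : List Int) (x : Int) (lo hi : Nat) : Nat :=
  if h : lo < hi then
    let mid := (lo + hi) / 2
    if a.getD mid 0 < x then bisectLeftB a x (mid + 1) hi
    else bisectLeftB a x lo mid
  else lo
termination_by hi - lo
decreasing_by
  · omega
  · omega

def pvBreakpointsB : List Int := [0, 325, 350, 370, 375, 379]
def pvLabelsB : List String :=
  ["Very High Risk (VHR) 2", "Very High Risk (VHR)", "High Risk (HR)",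
   "Medium Risk (MR)", "Low Risk (LR)", "Very Low Risk (VLR)"]

def get_risk_segment_alt (total_score : Int) : String :=
  let idx := bisectLeftB pvBreakpointsB total_score 0 pvBreakpointsB.length
  if idx = 0 then "NaN" else pvLabelsB.getD (idx - 1) ""

-- ===== PRECONDITION & SPEC =====
def Spec_get_risk_segment (total_score : Int) (out : String) : Prop := out = get_risk_segment_alt total_score
instance (total_score : Int) (out : String) : Decidable (Spec_get_risk_segment total_score out) := by unfold Spec_get_risk_segment; infer_instance

-- ===== CLAIM (what is proved, stated in full; the proofs are below) =====
def Claim_equal_get_risk_segment : Prop := ∀ (total_score : Int), Dom_get_risk_segment total_score → Spec_get_risk_segment total_score (get_risk_segment total_score)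

-- ===== LEMMAS AND PROOFS =====

theorem getA_eval (s : Int) :
    get_risk_segment s =
      if s > 379 then "Very Low Risk (VLR)"
      else if s > 375 then "Low Risk (LR)"
      else if s > 370 then "Medium Risk (MR)"
      else if s > 350 then "High Risk (HR)"
      else if s > 325 then "Very High Risk (VHR)"
      else if s > 0 then "Very High Risk (VHR) 2"
      else "NaN" := by
  simp [get_risk_segment, PySem.Dict.insert, PySem.Dict.empty, getRiskLoopA]

theorem bisect_base (a : List Int) (x : Int) (lo hi : Nat) (h : ¬ lo < hi) :
    bisectLeftB a x lo hi = lo := by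
  rw [bisectLeftB]; simp [h]

theorem bisect_step (a : List Int) (x : Int) (lo hi : Nat) (h : lo < hi) :
    bisectLeftB a x lo hi =
      if a.getD ((lo + hi) / 2) 0 < x then bisectLeftB a x ((lo + hi) / 2 + 1) hi
      else bisectLeftB a x lo ((lo + hi) / 2) := by
  rw [bisectLeftB]; simp [h]

theorem getB_eval (s : Int) :
    get_risk_segment_alt s =
      if s > 379 then "Very Low Risk (VLR)"
      else if s > 375 then "Low Risk (LR)"
      else if s > 370 then "Medium Risk (MR)"
      else if s > 350 then "High Risk (HR)"
      else if s > 325 then "Very High Risk (VHR)"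
      else if s > 0 then "Very High Risk (VHR) 2"
      else "NaN" := by
  unfold get_risk_segment_alt pvBreakpointsB pvLabelsB
  by_cases h0 : (0:Int) < s <;> by_cases h1 : (325:Int) < s <;>
    by_cases h2 : (350:Int) < s <;> by_cases h3 : (370:Int) < s <;>
    by_cases h4 : (375:Int) < s <;> by_cases h5 : (379:Int) < s <;>
    simp [bisect_step, bisect_base, h0, h1, h2, h3, h4, h5] <;> omega

-- ===== VERDICT (by name: the statement is the Claim_ definition above) =====
theorem get_risk_segment_spec : Claim_equal_get_risk_segment := by
  intro s _
  unfold Spec_get_risk_segment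
  rw [getA_eval, getB_eval]
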